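-- pv_equiv track=rewrite | github.com/0x4r35/CTF_solvers | n1^3.py | nullspace_basis
-- ===== SOURCE A (Python) =====
-- from typing import List, Tuple
--
-- P = 257
--
-- def rref(M: List[List[int]]) -> Tuple[List[List[int]], List[int]]:
--     """
--     Compute reduced row echelon form over GF(257). Returns (RREF, pivot_columns).
--     """
--     A = [row[:] for row in M]
--     n_rows = len(A)
--     n_cols = len(A[0]) if n_rows else 0
--     piv_cols: List[int] = []
--     r = 0
--     for c in range(n_cols):
--         # find pivot
--         piv = None
--         for i in range(r, n_rows):
--             if A[i][c] % P != 0: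
--                 piv = i
--                 break
--         if piv is None:
--             continue
--         if piv != r:
--             A[r], A[piv] = A[piv], A[r]
--         inv_p = pow(A[r][c] % P, -1, P)
--         for j in range(n_cols):
--             A[r][j] = (A[r][j] * inv_p) % P
--         for i in range(n_rows):
--             if i == r:
--                 continue
--             factor = A[i][c] % P
--             if factor != 0:
--                 for j in range(n_cols):
--                     A[i][j] = (A[i][j] - factor * A[r][j]) % P
--         piv_cols.append(c)
--         r += 1
--         if r == n_rows:
--             break
--     return A, piv_cols
--
-- def nullspace_basis(M: List[List[int]]) -> List[List[int]]:
--     """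
--     Full basis for nullspace over GF(257). Returns list of vectors (length n_cols).
--     """
--     R, piv_cols = rref(M)
--     n_rows = len(R)
--     n_cols = len(R[0]) if n_rows else 0
--     piv_set = set(piv_cols)
--     free_cols = [c for c in range(n_cols) if c not in piv_set]
--     if not free_cols:
--         return []
--     basis = []
--     for f in free_cols:
--         v = [0] * n_cols
--         v[f] = 1
--         # solve for pivots from bottom to top
--         for i in range(len(piv_cols) - 1, -1, -1):
--             c = piv_cols[i]
--             s = 0
--             Ri = R[i]
--             for j in range(c + 1, n_cols):
--                 if Ri[j] != 0 and v[j] != 0: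
--                     s = (s + Ri[j] * v[j]) % P
--             v[c] = (-s) % P
--         # normalize: last non-zero = 1
--         for i in range(n_cols - 1, -1, -1):
--             if v[i] % P != 0:
--                 inv = pow(v[i] % P, -1, P)
--                 v = [(vi * inv) % P for vi in v]
--                 break
--         basis.append(v)
--     return basis
-- ===== SOURCE B (Python) =====
-- from typing import List
--
-- P = 257
--
-- def _reduce(row: List[int], prow: List[int], c: int) -> List[int]:
--     f = row[c] % P
--     if f == 0:
--         return row
--     return [(x - f * y) % P for x, y in zip(row, prow)]
--
-- def _entry(done, f: int, j: int) -> int: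
--     if j == f:
--         return 1
--     for pc, row in done:
--         if pc == j:
--             return (-row[f]) % P
--     return 0
--
-- def nullspace_basis(M: List[List[int]]) -> List[List[int]]:
--     """
--     Full basis for nullspace over GF(257), by incremental row reduction:
--     keep a list `done` of (pivot_col, reduced_row) and a pool `rest` of
--     unprocessed rows, then build each free-column vector entry-by-entry.
--     """
--     n_cols = len(M[0]) if M else 0
--     done = []
--     rest = [row[:] for row in M]
--     for c in range(n_cols):
--         k = None
--         for i, row in enumerate(rest):
--             if row[c] % P != 0:
--                 k = i
--                 break
--         if k is None:
--             continue
--         inv = pow(rest[k][c] % P, -1, P)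
--         prow = [(x * inv) % P for x in rest[k]]
--         if k:
--             rest[k] = rest[0]
--         rest = rest[1:]
--         done = [(pc, _reduce(r, prow, c)) for pc, r in done] + [(c, prow)]
--         rest = [_reduce(r, prow, c) for r in rest]
--         if not rest:
--             break
--     piv_cols = [pc for pc, _ in done]
--     basis = []
--     for f in range(n_cols):
--         if f in piv_cols:
--             continue
--         basis.append([_entry(done, f, j) for j in range(n_cols)])
--     return basis
-- ===== Notes on version B (the rewrite author's own statement) =====
-- stated objective: alternative
-- what changed: B discards A's two-phase design (in-place index-addressed rref, then per free column a bottom-up back-substitution with an inner accumulation loop plus a renormalization pass) for an incremental row reduction that carries a list of finished (pivot_col, reduced_row) pairs and a shrinking pool of unprocessed rows, and then builds each basis vector entry-by-entry by looking the pivot row up per position.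
-- outside the precondition, e.g. on nullspace_basis([[0, 0], [1, 2, 3]]): A returns [[255, 1, 0], [254, 0, 1]], B returns [[255, 1]]
import Mathlib
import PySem

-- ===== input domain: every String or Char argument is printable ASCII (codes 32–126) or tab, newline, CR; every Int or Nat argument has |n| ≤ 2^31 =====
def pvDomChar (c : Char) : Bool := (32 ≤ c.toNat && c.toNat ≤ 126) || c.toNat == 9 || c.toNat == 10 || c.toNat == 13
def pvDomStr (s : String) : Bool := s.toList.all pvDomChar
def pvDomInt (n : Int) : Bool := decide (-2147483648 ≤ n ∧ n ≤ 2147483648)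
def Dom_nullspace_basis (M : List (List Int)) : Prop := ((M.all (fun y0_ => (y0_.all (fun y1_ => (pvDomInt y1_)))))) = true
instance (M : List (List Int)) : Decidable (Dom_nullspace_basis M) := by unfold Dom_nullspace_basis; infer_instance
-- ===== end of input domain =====

-- B replaces A's two-phase design (full rref of an index-addressed matrix, then per free
-- column a bottom-up back-substitution plus a renormalization pass) by an incremental row
-- reduction that maintains a list of finished (pivot_col, row) pairs and a pool of
-- unprocessed rows, and then builds every basis vector entry-by-entry; objective: alternative.

-- ===== PORT A =====
-- helper: matrix entry A[i][j]; exact under Pre_ (every access in the admitted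
-- programs is in range there)
def mget (A : List (List Int)) (i j : Nat) : Int := (A.getD i []).getD j 0

-- pow(x, -1, 257): Python's modular inverse; for x % 257 ≠ 0 it equals x^255 % 257
-- (Fermat, 257 prime) — proved where used (fermat257 below)
def modinv257 (x : Int) : Int := (x ^ 255) % 257

-- `for i in range(r, n_rows): if A[i][c] % P != 0: piv = i; break`
def findPiv (A : List (List Int)) (r n_rows c : Nat) : Option Nat :=
  (List.range' r (n_rows - r)).find? (fun i => mget A i c % 257 != 0)

-- `for j in range(n_cols): A[r][j] = (A[r][j] * inv_p) % P`
def scaleRow (row : List Int) (inv : Int) (n_cols : Nat) : List Int :=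
  row.mapIdx (fun j x => if j < n_cols then (x * inv) % 257 else x)

-- inner row operation `A[i][j] = (A[i][j] - factor * A[r][j]) % P`
def elimRow (row pr : List Int) (factor : Int) (n_cols : Nat) : List Int :=
  row.mapIdx (fun j x => if j < n_cols then (x - factor * pr.getD j 0) % 257 else x)

-- `for i in range(n_rows): ...` elimination loop
def elimAll (A : List (List Int)) (r c n_rows n_cols : Nat) : List (List Int) :=
  (List.range n_rows).foldl
    (fun B i =>
      if i = r then B
      else
        let factor := mget B i c % 257
        if factor != 0 then B.set i (elimRow (B.getD i []) (B.getD r []) factor n_cols) else B)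
    A

-- the `for c in range(n_cols)` loop with its `break` at r == n_rows
def rrefGo (n_rows n_cols : Nat) (cs : List Nat) (A : List (List Int)) (piv : List Nat) :
    List (List Int) × List Nat :=
  match cs with
  | [] => (A, piv)
  | c :: rest =>
    let r := piv.length
    match findPiv A r n_rows c with
    | none => rrefGo n_rows n_cols rest A piv
    | some p =>
      let A1 := if p ≠ r then (A.set r (A.getD p [])).set p (A.getD r []) else A
      let A2 := A1.set r (scaleRow (A1.getD r []) (modinv257 (mget A1 r c % 257)) n_cols)
      let A3 := elimAll A2 r c n_rows n_cols
      if piv.length + 1 = n_rows then (A3, piv ++ [c])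
      else rrefGo n_rows n_cols rest A3 (piv ++ [c])

-- module-level helper of A's source
def rref (M : List (List Int)) : List (List Int) × List Nat :=
  let n_rows := M.length
  let n_cols := if n_rows = 0 then 0 else (M.headD []).length
  rrefGo n_rows n_cols (List.range n_cols) M []

-- `s = 0; for j in range(c+1, n_cols): if Ri[j] != 0 and v[j] != 0: s = (s + Ri[j]*v[j]) % P`
def sAcc (Ri v : List Int) (c n_cols : Nat) : Int :=
  (List.range' (c + 1) (n_cols - (c + 1))).foldl
    (fun s j => if Ri.getD j 0 ≠ 0 ∧ v.getD j 0 ≠ 0 then (s + Ri.getD j 0 * v.getD j 0) % 257 else s)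
    0

-- `for i in range(len(piv_cols)-1, -1, -1): ... v[c] = (-s) % P`
def backSub (R : List (List Int)) (piv : List Nat) (n_cols : Nat) (v : List Int) : List Int :=
  (List.range piv.length).reverse.foldl
    (fun w i => w.set (piv.getD i 0) ((-(sAcc (R.getD i []) w (piv.getD i 0) n_cols)) % 257))
    v

-- `for i in reversed(range(n_cols)): if v[i] % P != 0: inv = ...; v = [...]; break`
def pyNormalize (v : List Int) (n_cols : Nat) : List Int :=
  match (List.range n_cols).reverse.find? (fun i => v.getD i 0 % 257 != 0) with
  | some i => v.map (fun x => (x * modinv257 (v.getD i 0 % 257)) % 257)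
  | none => v

def nullspace_basis (M : List (List Int)) : List (List Int) :=
  let Rp := rref M
  let R := Rp.1
  let piv := Rp.2
  let n_cols := if R.length = 0 then 0 else (R.headD []).length
  let free := (List.range n_cols).filter (fun c => !(piv.contains c))
  if free.isEmpty then []
  else free.map (fun f => pyNormalize (backSub R piv n_cols ((List.replicate n_cols 0).set f 1)) n_cols)

-- ===== PORT B =====
-- `_reduce(row, prow, c)`
def reduceRow (row prow : List Int) (c : Nat) : List Int :=
  if row.getD c 0 % 257 = 0 then row
  else (row.zip prow).map (fun xy => (xy.1 - (row.getD c 0 % 257) * xy.2) % 257)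

-- `_entry(done, f, j)`
def bEntry (done : List (Nat × List Int)) (f j : Nat) : Int :=
  if j = f then 1
  else
    match done.find? (fun pr => pr.1 == j) with
    | some pr => (-(pr.2.getD f 0)) % 257
    | none => 0

-- B's `for c in range(n_cols)` loop over the (done, rest) state with its break
def bGo (cs : List Nat) (done : List (Nat × List Int)) (rest : List (List Int)) :
    List (Nat × List Int) :=
  match cs with
  | [] => done
  | c :: cs' =>
    match rest.findIdx? (fun row => row.getD c 0 % 257 != 0) with
    | none => bGo cs' done rest
    | some k =>
      let prow := (rest.getD k []).map
        (fun x => (x * modinv257 ((rest.getD k []).getD c 0 % 257)) % 257)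
      let rest1 := (if k ≠ 0 then rest.set k (rest.getD 0 []) else rest).drop 1
      let done' := done.map (fun pr => (pr.1, reduceRow pr.2 prow c)) ++ [(c, prow)]
      let rest2 := rest1.map (fun r => reduceRow r prow c)
      if rest2.isEmpty then done' else bGo cs' done' rest2

def nullspace_basis_alt (M : List (List Int)) : List (List Int) :=
  let n_cols := if M.length = 0 then 0 else (M.headD []).length
  let done := bGo (List.range n_cols) [] M
  let piv_cols := done.map Prod.fst
  ((List.range n_cols).filter (fun f => !piv_cols.contains f)).map
    (fun f => (List.range n_cols).map (fun j => bEntry done f j))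

-- ===== PRECONDITION & SPEC =====
-- Pre_ admits matrices whose first row is empty (A returns [] without touching the other
-- rows) and otherwise requires a rectangular matrix (every row as long as the first): on
-- other ragged inputs A indexes rows past their end and raises IndexError for almost all
-- shapes, and whether it raises — or which trailing garbage of a longer swapped-in first
-- row it reads — depends on the values, not the shape, so the few ragged inputs on which
-- A happens to return are excluded together with the raising ones.
def Pre_nullspace_basis (M : List (List Int)) : Prop :=
  ∀ row ∈ M, (M.headD []).length = 0 ∨ row.length = (M.headD []).length
instance (M : List (List Int)) : Decidable (Pre_nullspace_basis M) := by
  unfold Pre_nullspace_basis; infer_instance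

def pvWitness_nullspace_basis : List (List Int) := [[1, 2, 3], [2, 4, 6]]

def Spec_nullspace_basis (M : List (List Int)) (out : List (List Int)) : Prop := out = nullspace_basis_alt M
instance (M : List (List Int)) (out : List (List Int)) : Decidable (Spec_nullspace_basis M out) := by unfold Spec_nullspace_basis; infer_instance

-- ===== CLAIM (what is proved, stated in full; the proofs are below) =====
def Claim_equal_nullspace_basis : Prop := ∀ (M : List (List Int)), Dom_nullspace_basis M → Pre_nullspace_basis M → Spec_nullspace_basis M (nullspace_basis M)

-- ===== LEMMAS AND PROOFS =====

-- basic getD toolkit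
theorem getD_set' {α : Type} (l : List α) (n m : Nat) (a d : α) :
    (l.set n a).getD m d = if m = n ∧ n < l.length then a else l.getD m d := by
  simp [List.getD_eq_getElem?_getD, List.getElem?_set]
  split_ifs <;> simp_all

theorem getD_mapIdx' (l : List Int) (f : Nat → Int → Int) (m : Nat) (d : Int) :
    (l.mapIdx f).getD m d = if m < l.length then f m (l.getD m d) else d := by
  simp [List.getD_eq_getElem?_getD, List.getElem?_mapIdx]
  split_ifs with h
  · rw [List.getElem?_eq_getElem h]; simp
  · rw [List.getElem?_eq_none (by omega)]; rfl

theorem getD_append_lt {α : Type} (D T : List α) (d : α) (i : Nat) (h : i < D.length) :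
    (D ++ T).getD i d = D.getD i d := by
  simp [List.getD_eq_getElem?_getD, List.getElem?_append_left h]

theorem getD_append_ge {α : Type} (D T : List α) (d : α) (i : Nat) (h : D.length ≤ i) :
    (D ++ T).getD i d = T.getD (i - D.length) d := by
  simp [List.getD_eq_getElem?_getD, List.getElem?_append_right h]

theorem mget_set (A : List (List Int)) (i i' j : Nat) (row : List Int) :
    mget (A.set i row) i' j = if i' = i ∧ i < A.length then row.getD j 0 else mget A i' j := by
  simp only [mget]
  rw [getD_set']
  split_ifs <;> rfl

theorem mget_oob (A : List (List Int)) (i j : Nat) (hrows : ∀ row ∈ A, row.length ≤ j) :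
    mget A i j = 0 := by
  simp only [mget]
  by_cases hi : i < A.length
  · rw [List.getD_eq_getElem A [] hi]
    exact List.getD_eq_default _ _ (hrows _ (List.getElem_mem hi))
  · have he : A.getD i [] = [] := List.getD_eq_default _ _ (by omega)
    rw [he]; rfl

-- Fermat: pow(x, -1, 257) = x^255 % 257 really inverts x (257 is prime)
theorem fermat257 (x : Int) (h : x % 257 ≠ 0) : (x * ((x % 257) ^ 255 % 257)) % 257 = 1 := by
  have h1 : (x % 257) % 257 = x % 257 := Int.emod_emod_of_dvd x dvd_rfl
  have h2 : (x * ((x % 257) ^ 255 % 257)) % 257 = (x ^ 256) % 257 := by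
    conv_lhs => rw [Int.mul_emod, Int.emod_emod_of_dvd _ dvd_rfl]
    rw [← Int.mul_emod]
    have : (x % 257) ^ 255 % 257 = x ^ 255 % 257 := by
      have : Int.ModEq 257 (x % 257) x := h1
      simpa [Int.ModEq] using (this.pow 255)
    rw [Int.mul_emod, this, ← Int.mul_emod, ← pow_succ']
  rw [h2]
  have hp : Fact (Nat.Prime 257) := ⟨by norm_num⟩
  have hz : (x : ZMod 257) ≠ 0 := by
    intro hz
    rw [ZMod.intCast_zmod_eq_zero_iff_dvd] at hz
    exact h (Int.emod_eq_zero_of_dvd (by exact_mod_cast hz))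
  have hpow : ((x ^ 256 : Int) : ZMod 257) = ((1 : Int) : ZMod 257) := by
    push_cast
    exact ZMod.pow_card_sub_one_eq_one hz
  have := (ZMod.intCast_eq_intCast_iff _ _ _).mp hpow
  simpa [Int.ModEq] using this

-- loop invariant of rref's column loop after processing columns [0, c)
structure RInv (n_rows n_cols c : Nat) (A : List (List Int)) (piv : List Nat) : Prop where
  hlen : A.length = n_rows
  hrows : ∀ row ∈ A, row.length = n_cols
  hpw : piv.Pairwise (· < ·)
  hlt : ∀ p ∈ piv, p < c
  hr : piv.length ≤ n_rows
  hbnd : ∀ i j, i < piv.length → j < n_cols → 0 ≤ mget A i j ∧ mget A i j < 257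
  hdel : ∀ i k, i < piv.length → k < piv.length → mget A i (piv.getD k 0) = if i = k then 1 else 0
  hzero : ∀ i j, i < piv.length → j < piv.getD i 0 → j ∉ piv → mget A i j = 0
  hbelow : ∀ i j, piv.length ≤ i → i < n_rows → j < c → mget A i j % 257 = 0

-- what the final theorem needs from rref's output
structure Good (n_rows n_cols : Nat) (R : List (List Int)) (piv : List Nat) : Prop where
  hlen : R.length = n_rows
  hrows : ∀ row ∈ R, row.length = n_cols
  hpw : piv.Pairwise (· < ·)
  hlt : ∀ p ∈ piv, p < n_cols
  hr : piv.length ≤ n_rows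
  hbnd : ∀ i j, i < piv.length → j < n_cols → 0 ≤ mget R i j ∧ mget R i j < 257
  hdel : ∀ i k, i < piv.length → k < piv.length → mget R i (piv.getD k 0) = if i = k then 1 else 0
  hzero : ∀ i j, i < piv.length → j < piv.getD i 0 → j ∉ piv → mget R i j = 0

theorem good_of_inv {n_rows n_cols c : Nat} {A : List (List Int)} {piv : List Nat}
    (h : RInv n_rows n_cols c A piv) (hc : c ≤ n_cols) : Good n_rows n_cols A piv :=
  ⟨h.hlen, h.hrows, h.hpw, fun p hp => lt_of_lt_of_le (h.hlt p hp) hc, h.hr, h.hbnd, h.hdel, h.hzero⟩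

-- characterization of the elimination loop `for i in range(n_rows): ...`
theorem elimAll_spec (A : List (List Int)) (r c n_rows n_cols : Nat)
    (hA : A.length = n_rows) (hrows : ∀ row ∈ A, row.length = n_cols) :
    (elimAll A r c n_rows n_cols).length = n_rows ∧
    (∀ row ∈ elimAll A r c n_rows n_cols, row.length = n_cols) ∧
    (∀ i j, mget (elimAll A r c n_rows n_cols) i j =
      if i < n_rows ∧ i ≠ r ∧ mget A i c % 257 ≠ 0 ∧ j < n_cols then
        (mget A i j - (mget A i c % 257) * mget A r j) % 257
      else mget A i j) := by
  have key : ∀ m, m ≤ n_rows →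
      ((List.range m).foldl
        (fun B i =>
          if i = r then B
          else
            let factor := mget B i c % 257
            if factor != 0 then B.set i (elimRow (B.getD i []) (B.getD r []) factor n_cols) else B)
        A).length = n_rows ∧
      (∀ row ∈ (List.range m).foldl
        (fun B i =>
          if i = r then B
          else
            let factor := mget B i c % 257
            if factor != 0 then B.set i (elimRow (B.getD i []) (B.getD r []) factor n_cols) else B)
        A, row.length = n_cols) ∧
      (∀ i j, mget ((List.range m).foldl
        (fun B i =>
          if i = r then B
          else
            let factor := mget B i c % 257
            if factor != 0 then B.set i (elimRow (B.getD i []) (B.getD r []) factor n_cols) else B)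
        A) i j =
        if i < m ∧ i ≠ r ∧ mget A i c % 257 ≠ 0 ∧ j < n_cols then
          (mget A i j - (mget A i c % 257) * mget A r j) % 257
        else mget A i j) := by
    intro m
    induction m with
    | zero => intro _; refine ⟨hA, hrows, fun i j => ?_⟩; simp
    | succ m ih =>
      intro hm
      obtain ⟨ihlen, ihrows, ihget⟩ := ih (by omega)
      rw [List.range_succ, List.foldl_append, List.foldl_cons, List.foldl_nil]
      set B := (List.range m).foldl
        (fun B i =>
          if i = r then B
          else
            let factor := mget B i c % 257
            if factor != 0 then B.set i (elimRow (B.getD i []) (B.getD r []) factor n_cols) else B)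
        A with hB
      have horigm : ∀ j, mget B m j = mget A m j := by
        intro j; rw [ihget]; simp
      have horigr : ∀ j, mget B r j = mget A r j := by
        intro j; rw [ihget]; simp
      by_cases hmr : m = r
      · rw [if_pos hmr]
        refine ⟨ihlen, ihrows, fun i j => ?_⟩
        rw [ihget]
        by_cases hi : i < m ∧ i ≠ r ∧ mget A i c % 257 ≠ 0 ∧ j < n_cols
        · rw [if_pos hi, if_pos ⟨by omega, hi.2.1, hi.2.2.1, hi.2.2.2⟩]
        · rw [if_neg hi, if_neg (by subst hmr; intro h; exact hi ⟨by omega, h.2.1, h.2.2.1, h.2.2.2⟩)]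
      · simp only [if_neg hmr]
        by_cases hf : mget B m c % 257 ≠ 0
        · have hfac : mget B m c % 257 = mget A m c % 257 := by rw [horigm]
          have hcond : (mget B m c % 257 != 0) = true := by simpa using hf
          simp only [hcond, if_true]
          have hrowm : (B.getD m []).length = n_cols := by
            apply ihrows
            have : m < B.length := by omega
            rw [List.getD_eq_getElem B [] this]
            exact List.getElem_mem this
          have hrowget : ∀ j, (B.getD m []).getD j 0 = mget B m j := fun _ => rfl
          have hergetD : ∀ j, (elimRow (B.getD m []) (B.getD r []) (mget B m c % 257) n_cols).getD j 0 =
              if j < n_cols then (mget A m j - (mget A m c % 257) * mget A r j) % 257 else 0 := by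
            intro j
            rw [elimRow, getD_mapIdx', hrowm]
            by_cases hj : j < n_cols
            · rw [if_pos hj, if_pos hj, hrowget, horigm, hfac]
              have : (B.getD r []).getD j 0 = mget B r j := rfl
              rw [this, horigr, if_pos hj]
            · rw [if_neg hj, if_neg hj]
          constructor
          · rw [List.length_set]; exact ihlen
          · constructor
            · intro row hrow
              rcases List.mem_or_eq_of_mem_set hrow with h | h
              · exact ihrows _ h
              · rw [h, elimRow, List.length_mapIdx]; exact hrowm
            · intro i j
              rw [mget_set]
              by_cases him : i = m ∧ m < B.length
              · rw [if_pos him, hergetD]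
                rcases him with ⟨him, _⟩
                subst him
                by_cases hj : j < n_cols
                · rw [if_pos hj, if_pos ⟨by omega, hmr, by rw [← hfac]; exact hf, hj⟩]
                · rw [if_neg hj, if_neg (by intro h; exact hj h.2.2.2)]
                  symm
                  exact mget_oob A i j (fun row hrow => by rw [hrows row hrow]; omega)
              · rw [if_neg him, ihget]
                have him' : i ≠ m := by
                  intro h; exact him ⟨h, by omega⟩
                by_cases hi : i < m ∧ i ≠ r ∧ mget A i c % 257 ≠ 0 ∧ j < n_cols
                · rw [if_pos hi, if_pos ⟨by omega, hi.2.1, hi.2.2.1, hi.2.2.2⟩]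
                · rw [if_neg hi, if_neg (by intro h; exact hi ⟨by omega, h.2.1, h.2.2.1, h.2.2.2⟩)]
        · rw [not_not] at hf
          have hcond : (mget B m c % 257 != 0) = false := by simpa using hf
          simp only [hcond, Bool.false_eq_true, if_false]
          refine ⟨ihlen, ihrows, fun i j => ?_⟩
          rw [ihget]
          have hfA : mget A m c % 257 = 0 := by rw [← horigm]; exact hf
          by_cases hi : i < m ∧ i ≠ r ∧ mget A i c % 257 ≠ 0 ∧ j < n_cols
          · rw [if_pos hi, if_pos ⟨by omega, hi.2.1, hi.2.2.1, hi.2.2.2⟩]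
          · rw [if_neg hi]
            rw [if_neg (by
              intro h
              by_cases him : i = m
              · exact h.2.2.1 (him ▸ hfA)
              · exact hi ⟨by omega, h.2.1, h.2.2.1, h.2.2.2⟩)]
  obtain ⟨h1, h2, h3⟩ := key n_rows le_rfl
  exact ⟨h1, h2, h3⟩

-- one pivot step of the column loop preserves the invariant
theorem step_inv (n_rows n_cols c : Nat) (A : List (List Int)) (piv : List Nat)
    (hI : RInv n_rows n_cols c A piv) (hc : c < n_cols) (p : Nat)
    (hrp : piv.length ≤ p) (hpn : p < n_rows) (hpc : mget A p c % 257 ≠ 0) :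
    let r := piv.length
    let A1 := if p ≠ r then (A.set r (A.getD p [])).set p (A.getD r []) else A
    let A2 := A1.set r (scaleRow (A1.getD r []) (modinv257 (mget A1 r c % 257)) n_cols)
    RInv n_rows n_cols (c + 1) (elimAll A2 r c n_rows n_cols) (piv ++ [c]) := by
  intro r A1 A2
  have hrn : r < n_rows := by omega
  have hA1len : A1.length = n_rows := by
    simp only [A1]; split_ifs <;> simp [hI.hlen]
  have hA1rows : ∀ row ∈ A1, row.length = n_cols := by
    intro row hrow
    simp only [A1] at hrow
    split_ifs at hrow
    · rcases List.mem_or_eq_of_mem_set hrow with h | h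
      · rcases List.mem_or_eq_of_mem_set h with h' | h'
        · exact hI.hrows _ h'
        · subst h'
          refine hI.hrows _ ?_
          rw [List.getD_eq_getElem A [] (by rw [hI.hlen]; omega : p < A.length)]
          exact List.getElem_mem _
      · subst h
        refine hI.hrows _ ?_
        rw [List.getD_eq_getElem A [] (by rw [hI.hlen]; omega : r < A.length)]
        exact List.getElem_mem _
    · exact hI.hrows _ hrow
  have hA1get : ∀ i j, mget A1 i j =
      if i = p then mget A r j else if i = r then mget A p j else mget A i j := by
    intro i j
    simp only [A1]
    by_cases hpr : p = r
    · rw [if_neg (fun h => h hpr)]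
      by_cases hip : i = p
      · rw [if_pos hip, hip, hpr]
      · have hir : i ≠ r := by rw [← hpr]; exact hip
        rw [if_neg hip, if_neg hir]
    · rw [if_pos (by exact hpr)]
      rw [mget_set, mget_set]
      simp only [List.length_set, hI.hlen]
      by_cases hip : i = p
      · rw [if_pos ⟨hip, hpn⟩, if_pos hip]
        rfl
      · rw [if_neg (by tauto), if_neg hip]
        by_cases hir : i = r
        · rw [if_pos ⟨hir, by omega⟩, if_pos hir]
          rfl
        · rw [if_neg (by tauto), if_neg hir]
  have hA1lo : ∀ i j, i < r → mget A1 i j = mget A i j := by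
    intro i j hi
    rw [hA1get, if_neg (by omega), if_neg (by omega)]
  have hA1r : ∀ j, mget A1 r j = mget A p j := by
    intro j
    rw [hA1get]
    by_cases hpr : p = r
    · rw [if_pos hpr.symm, hpr]
    · rw [if_neg (by omega), if_pos rfl]
  have hA1below : ∀ i j, r ≤ i → i < n_rows → j < c → mget A1 i j % 257 = 0 := by
    intro i j hi hin hj
    rw [hA1get]
    split_ifs with h1 h2
    · exact hI.hbelow r j le_rfl hrn hj
    · exact hI.hbelow p j hrp hpn hj
    · exact hI.hbelow i j hi hin hj
  -- scaling
  have hrowr : (A1.getD r []).length = n_cols := by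
    refine hA1rows _ ?_
    rw [List.getD_eq_getElem A1 [] (by omega : r < A1.length)]
    exact List.getElem_mem _
  have hA2len : A2.length = n_rows := by simp [A2, hA1len]
  have hA2rows : ∀ row ∈ A2, row.length = n_cols := by
    intro row hrow
    rcases List.mem_or_eq_of_mem_set hrow with h | h
    · exact hA1rows _ h
    · rw [h, scaleRow, List.length_mapIdx]; exact hrowr
  have hA2other : ∀ i j, i ≠ r → mget A2 i j = mget A1 i j := by
    intro i j hi
    simp only [A2]
    rw [mget_set, if_neg (by tauto)]
  have hA2r : ∀ j, j < n_cols →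
      mget A2 r j = (mget A1 r j * modinv257 (mget A1 r c % 257)) % 257 := by
    intro j hj
    simp only [A2]
    rw [mget_set, if_pos ⟨rfl, by omega⟩, scaleRow, getD_mapIdx', hrowr, if_pos hj, if_pos hj]
    rfl
  have hxc : mget A1 r c % 257 ≠ 0 := by rw [hA1r]; exact hpc
  have hA2rc : mget A2 r c = 1 := by
    rw [hA2r c hc, modinv257]
    exact fermat257 _ hxc
  have hA2rlow : ∀ j, j < c → mget A2 r j = 0 := by
    intro j hj
    rw [hA2r j (by omega), Int.mul_emod, hA1below r j le_rfl hrn hj]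
    simp
  have hA2bndr : ∀ j, j < n_cols → 0 ≤ mget A2 r j ∧ mget A2 r j < 257 := by
    intro j hj
    rw [hA2r j hj]
    exact ⟨Int.emod_nonneg _ (by norm_num), Int.emod_lt_of_pos _ (by norm_num)⟩
  obtain ⟨hE1, hE2, hE3⟩ := elimAll_spec A2 r c n_rows n_cols hA2len hA2rows
  -- piv ++ [c] accessors
  have hg1 : ∀ k, k < piv.length → (piv ++ [c]).getD k 0 = piv.getD k 0 := by
    intro k hk
    simp [List.getD_eq_getElem?_getD, List.getElem?_append_left hk]
  have hg2 : (piv ++ [c]).getD piv.length 0 = c := by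
    simp [List.getD_eq_getElem?_getD]
  have hpivmem : ∀ k, k < piv.length → piv.getD k 0 ∈ piv := by
    intro k hk
    rw [List.getD_eq_getElem piv 0 hk]
    exact List.getElem_mem _
  have hpivlt : ∀ k, k < piv.length → piv.getD k 0 < c := fun k hk => hI.hlt _ (hpivmem k hk)
  -- entries of reduced rows of A2 below r are the original A entries
  have hA2lo : ∀ i j, i < r → mget A2 i j = mget A i j := by
    intro i j hi
    rw [hA2other i j (by omega), hA1lo i j hi]
  have hfac : ∀ i, i < r → mget A2 i c % 257 = mget A i c := by
    intro i hi
    rw [hA2lo i c hi]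
    have := hI.hbnd i c hi hc
    omega
  refine ⟨hE1, hE2, ?_, ?_, ?_, ?_, ?_, ?_, ?_⟩
  · rw [List.pairwise_append]
    exact ⟨hI.hpw, by simp, fun a ha b hb => by
      simp only [List.mem_singleton] at hb
      subst hb
      exact hI.hlt a ha⟩
  · intro q hq
    rcases List.mem_append.mp hq with h | h
    · have := hI.hlt q h; omega
    · simp only [List.mem_singleton] at h; omega
  · simp; omega
  · -- bounds
    intro i j hi hj
    simp only [List.length_append, List.length_singleton] at hi
    rw [hE3]
    split_ifs with h
    · exact ⟨Int.emod_nonneg _ (by norm_num), Int.emod_lt_of_pos _ (by norm_num)⟩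
    · by_cases hir : i = r
      · subst hir; exact hA2bndr j hj
      · have hi' : i < r := by omega
        rw [hA2lo i j hi']
        exact hI.hbnd i j hi' hj
  · -- delta
    intro i k hi hk
    simp only [List.length_append, List.length_singleton] at hi hk
    by_cases hkr : k = piv.length
    · subst hkr
      rw [hg2]
      by_cases hir : i = r
      · subst hir
        rw [hE3, if_neg (by tauto), hA2rc, if_pos rfl]
      · have hi' : i < r := by omega
        rw [hE3]
        by_cases hf : mget A2 i c % 257 ≠ 0
        · rw [if_pos ⟨by omega, hir, hf, hc⟩, hA2lo i c hi', hA2rc, if_neg (by omega), mul_one]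
          omega
        · rw [not_not] at hf
          rw [if_neg (by tauto), if_neg (by omega), hA2lo i c hi', ← hfac i hi']
          exact hf
    · have hk' : k < piv.length := by omega
      rw [hg1 k hk']
      have hjk : piv.getD k 0 < c := hpivlt k hk'
      by_cases hir : i = r
      · subst hir
        rw [hE3, if_neg (by tauto), hA2rlow _ hjk, if_neg (by omega)]
      · have hi' : i < r := by omega
        rw [hE3]
        by_cases hf : mget A2 i c % 257 ≠ 0
        · rw [if_pos ⟨by omega, hir, hf, by omega⟩, hA2lo _ _ hi', hA2rlow _ hjk,
            hI.hdel i k hi' hk']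
          split_ifs <;> simp
        · rw [if_neg (by tauto), hA2lo _ _ hi', hI.hdel i k hi' hk']
  · -- zeros left of the pivot
    intro i j hi hj hjmem
    simp only [List.length_append, List.length_singleton] at hi
    have hjp : j ∉ piv := fun h => hjmem (List.mem_append.mpr (Or.inl h))
    have hjc : j ≠ c := fun h => hjmem (by simp [h])
    by_cases hir : i = r
    · subst hir
      rw [hg2] at hj
      rw [hE3, if_neg (by tauto), hA2rlow _ hj]
    · have hi' : i < r := by omega
      rw [hg1 i hi'] at hj
      have hjc' : j < c := lt_trans hj (hpivlt i hi')
      rw [hE3]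
      by_cases hf : mget A2 i c % 257 ≠ 0
      · rw [if_pos ⟨by omega, hir, hf, by omega⟩, hA2lo _ _ hi', hA2rlow _ hjc',
          hI.hzero i j hi' hj hjp]
        simp
      · rw [if_neg (by tauto), hA2lo _ _ hi', hI.hzero i j hi' hj hjp]
  · -- rows below stay ≡ 0 on processed columns
    intro i j hi hin hj
    simp only [List.length_append, List.length_singleton] at hi
    have hir : i ≠ r := by omega
    rw [hE3]
    by_cases hf : mget A2 i c % 257 ≠ 0
    · rw [if_pos ⟨hin, hir, hf, by omega⟩, Int.emod_emod_of_dvd _ dvd_rfl]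
      by_cases hjc : j < c
      · rw [hA2rlow _ hjc, hA2other i j hir, mul_zero, sub_zero]
        exact hA1below i j (by omega) hin hjc
      · have hjc' : j = c := by omega
        rw [hjc', hA2rc, mul_one, hA2other i c hir]
        omega
    · rw [not_not] at hf
      rw [if_neg (by tauto), hA2other i j hir]
      by_cases hjc : j < c
      · exact hA1below i j (by omega) hin hjc
      · have hjc' : j = c := by omega
        rw [hjc']
        rw [hA2other i c hir] at hf
        exact hf

-- proof-side name for the matrix after swap + scaling in one pivot step
def stepA2 (A : List (List Int)) (r p c n_cols : Nat) : List (List Int) :=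
  let A1 := if p ≠ r then (A.set r (A.getD p [])).set p (A.getD r []) else A
  A1.set r (scaleRow (A1.getD r []) (modinv257 (mget A1 r c % 257)) n_cols)

theorem rrefGo_cons_none (n_rows n_cols c : Nat) (cs : List Nat) (A : List (List Int))
    (piv : List Nat) (h : findPiv A piv.length n_rows c = none) :
    rrefGo n_rows n_cols (c :: cs) A piv = rrefGo n_rows n_cols cs A piv := by
  simp only [rrefGo, h]

theorem rrefGo_cons_some (n_rows n_cols c : Nat) (cs : List Nat) (A : List (List Int))
    (piv : List Nat) (p : Nat) (h : findPiv A piv.length n_rows c = some p) :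
    rrefGo n_rows n_cols (c :: cs) A piv =
      if piv.length + 1 = n_rows then
        (elimAll (stepA2 A piv.length p c n_cols) piv.length c n_rows n_cols, piv ++ [c])
      else rrefGo n_rows n_cols cs (elimAll (stepA2 A piv.length p c n_cols) piv.length c n_rows n_cols)
        (piv ++ [c]) := by
  simp only [rrefGo, h, stepA2]

theorem rrefGo_good (n_rows n_cols : Nat) :
    ∀ (k c : Nat) (A : List (List Int)) (piv : List Nat), c + k = n_cols →
      RInv n_rows n_cols c A piv →
      Good n_rows n_cols (rrefGo n_rows n_cols (List.range' c k) A piv).1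
        (rrefGo n_rows n_cols (List.range' c k) A piv).2 := by
  intro k
  induction k with
  | zero =>
    intro c A piv hck hInv
    simpa [rrefGo] using good_of_inv hInv (by omega)
  | succ k ih =>
    intro c A piv hck hInv
    rw [List.range'_succ]
    cases hfp : findPiv A piv.length n_rows c with
    | none =>
      rw [rrefGo_cons_none n_rows n_cols c _ A piv hfp]
      apply ih (c + 1) A piv (by omega)
      refine ⟨hInv.hlen, hInv.hrows, hInv.hpw,
        fun q hq => by have := hInv.hlt q hq; omega, hInv.hr, hInv.hbnd, hInv.hdel, hInv.hzero, ?_⟩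
      intro i j hi hin hj
      by_cases hjc : j < c
      · exact hInv.hbelow i j hi hin hjc
      · have hj' : j = c := by omega
        have hnone := List.find?_eq_none.mp hfp i (by
          rw [List.mem_range'_1]
          have := hInv.hr
          omega)
        rw [hj']
        simpa using hnone
    | some p =>
      have hmem := List.mem_of_find?_eq_some hfp
      have hpred := List.find?_some hfp
      rw [List.mem_range'_1] at hmem
      have hrp : piv.length ≤ p := hmem.1
      have hpn : p < n_rows := by have := hmem.2; have := hInv.hr; omega
      have hpc : mget A p c % 257 ≠ 0 := by simpa using hpred
      have hstep : RInv n_rows n_cols (c + 1)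
          (elimAll (stepA2 A piv.length p c n_cols) piv.length c n_rows n_cols) (piv ++ [c]) :=
        step_inv n_rows n_cols c A piv hInv (by omega) p hrp hpn hpc
      rw [rrefGo_cons_some n_rows n_cols c _ A piv p hfp]
      by_cases hbr : piv.length + 1 = n_rows
      · rw [if_pos hbr]
        exact good_of_inv hstep (by omega)
      · rw [if_neg hbr]
        exact ih (c + 1) _ _ (by omega) hstep

theorem rref_good (M : List (List Int))
    (hPre : ∀ row ∈ M, row.length = (M.headD []).length) :
    Good M.length (if M.length = 0 then 0 else (M.headD []).length) (rref M).1 (rref M).2 := by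
  have hrw : rref M = rrefGo M.length (if M.length = 0 then 0 else (M.headD []).length)
      (List.range' 0 (if M.length = 0 then 0 else (M.headD []).length)) M [] := by
    rw [rref, ← List.range_eq_range']
  rw [hrw]
  apply rrefGo_good _ _ _ 0 M [] (by omega)
  refine ⟨rfl, ?_, by simp, by simp, by simp, ?_, ?_, ?_, ?_⟩
  · intro row hrow
    have hne : M.length ≠ 0 := by
      intro h
      rw [List.length_eq_zero_iff] at h
      subst h
      simp at hrow
    rw [if_neg hne]
    exact hPre row hrow
  · intro i j hi; simp at hi
  · intro i k hi; simp at hi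
  · intro i j hi; simp at hi
  · intro i j _ _ hj; omega

-- the common value of both per-vector computations: entry j of the basis vector for free
-- column f, with the pivots of index < t not yet filled in (A fills them from the top index down)
def Wp (R : List (List Int)) (piv : List Nat) (f t j : Nat) : Int :=
  match (piv.zipIdx.drop t).find? (fun ci => ci.1 == j) with
  | some ci => (-(mget R ci.2 f)) % 257
  | none => if j = f then 1 else 0

theorem Wp_past (R : List (List Int)) (piv : List Nat) (f t j : Nat) (ht : piv.length ≤ t) :
    Wp R piv f t j = if j = f then 1 else 0 := by
  rw [Wp]
  have hd : piv.zipIdx.drop t = [] := List.drop_eq_nil_of_le (by simpa using ht)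
  rw [hd]
  rfl

theorem Wp_step (R : List (List Int)) (piv : List Nat) (f t j : Nat) (ht : t < piv.length) :
    Wp R piv f t j =
      if piv.getD t 0 = j then (-(mget R t f)) % 257 else Wp R piv f (t + 1) j := by
  rw [Wp, Wp]
  have hd : piv.zipIdx.drop t = (piv[t], t) :: piv.zipIdx.drop (t + 1) := by
    rw [List.drop_eq_getElem_cons (by simpa using ht)]
    congr 1
    rw [List.getElem_zipIdx]
    simp
  rw [hd, List.find?_cons, List.getD_eq_getElem piv 0 ht]
  by_cases hj : piv[t] = j
  · have : (piv[t] == j) = true := by simpa using hj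
    rw [this, if_pos hj]
  · have : (piv[t] == j) = false := by simpa using hj
    rw [this, if_neg hj]

theorem find_drop_mem (piv : List Nat) (t j : Nat) (ci : Nat × Nat)
    (h : (piv.zipIdx.drop t).find? (fun ci => ci.1 == j) = some ci) :
    ci.1 = j ∧ ci.2 < piv.length ∧ piv.getD ci.2 0 = j := by
  have h1 := List.find?_some h
  simp only at h1
  have h2 : ci ∈ piv.zipIdx := List.mem_of_mem_drop (List.mem_of_find?_eq_some h)
  obtain ⟨a, i⟩ := ci
  obtain ⟨_, hilen, hval⟩ := List.mem_zipIdx h2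
  simp only at h1 ⊢
  have ha : a = j := by simpa using h1
  have hl : i < piv.length := by simpa using hilen
  refine ⟨ha, hl, ?_⟩
  rw [List.getD_eq_getElem piv 0 hl, ← ha, hval]
  simp

theorem Wp_notmem (R : List (List Int)) (piv : List Nat) (f t j : Nat) (hj : j ∉ piv) :
    Wp R piv f t j = if j = f then 1 else 0 := by
  rw [Wp]
  cases hfind : (piv.zipIdx.drop t).find? (fun ci => ci.1 == j) with
  | none => rfl
  | some ci =>
    obtain ⟨h1, h2, h3⟩ := find_drop_mem piv t j ci hfind
    exact absurd (by rw [← h3]; exact List.getD_eq_getElem piv 0 h2 ▸ List.getElem_mem h2) hj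

theorem Wp_bounds (R : List (List Int)) (piv : List Nat) (f t j : Nat) :
    0 ≤ Wp R piv f t j ∧ Wp R piv f t j < 257 := by
  rw [Wp]
  cases hfind : (piv.zipIdx.drop t).find? (fun ci => ci.1 == j) with
  | none => split_ifs <;> norm_num
  | some ci => exact ⟨Int.emod_nonneg _ (by norm_num), Int.emod_lt_of_pos _ (by norm_num)⟩

theorem Wp_gt (n_rows n_cols : Nat) (R : List (List Int)) (piv : List Nat)
    (hG : Good n_rows n_cols R piv) (f t j : Nat) (hfp : f ∉ piv) (hj : f < j) :
    Wp R piv f t j = 0 := by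
  rw [Wp]
  cases hfind : (piv.zipIdx.drop t).find? (fun ci => ci.1 == j) with
  | none => rw [if_neg (by omega)]
  | some ci =>
    obtain ⟨h1, h2, h3⟩ := find_drop_mem piv t j ci hfind
    show -mget R ci.2 f % 257 = 0
    rw [hG.hzero ci.2 f h2 (by omega) hfp]
    simp

-- the inner accumulation loop does nothing when no term fires
theorem sAcc_skip (Ri v : List Int) :
    ∀ (l : List Nat) (s0 : Int), (∀ j ∈ l, ¬(Ri.getD j 0 ≠ 0 ∧ v.getD j 0 ≠ 0)) →
      l.foldl (fun s j => if Ri.getD j 0 ≠ 0 ∧ v.getD j 0 ≠ 0 then (s + Ri.getD j 0 * v.getD j 0) % 257 else s) s0 = s0 := by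
  intro l
  induction l with
  | nil => intro s0 _; rfl
  | cons x l ih =>
    intro s0 h
    rw [List.foldl_cons, if_neg (h x List.mem_cons_self)]
    exact ih s0 (fun j hj => h j (List.mem_cons_of_mem x hj))

-- ... and picks up exactly the term at f0 when at most that one can fire
theorem sAcc_single (Ri v : List Int) (f0 : Nat) :
    ∀ (l : List Nat) (s0 : Int), l.Nodup →
      (∀ j ∈ l, j ≠ f0 → ¬(Ri.getD j 0 ≠ 0 ∧ v.getD j 0 ≠ 0)) →
      l.foldl (fun s j => if Ri.getD j 0 ≠ 0 ∧ v.getD j 0 ≠ 0 then (s + Ri.getD j 0 * v.getD j 0) % 257 else s) s0 =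
        if f0 ∈ l ∧ Ri.getD f0 0 ≠ 0 ∧ v.getD f0 0 ≠ 0 then (s0 + Ri.getD f0 0 * v.getD f0 0) % 257 else s0 := by
  intro l
  induction l with
  | nil => intro s0 _ _; rw [if_neg (by simp)]; rfl
  | cons x l ih =>
    intro s0 hnd h
    rw [List.nodup_cons] at hnd
    rw [List.foldl_cons]
    by_cases hxf : x = f0
    · subst hxf
      by_cases hfire : Ri.getD x 0 ≠ 0 ∧ v.getD x 0 ≠ 0
      · rw [if_pos hfire, sAcc_skip Ri v l _ (fun j hj => by
          have : j ≠ x := fun he => hnd.1 (he ▸ hj)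
          exact h j (List.mem_cons_of_mem x hj) this)]
        rw [if_pos ⟨List.mem_cons_self, hfire⟩]
      · rw [if_neg hfire, sAcc_skip Ri v l _ (fun j hj => by
          have : j ≠ x := fun he => hnd.1 (he ▸ hj)
          exact h j (List.mem_cons_of_mem x hj) this)]
        rw [if_neg (by tauto)]
    · rw [if_neg (h x List.mem_cons_self hxf)]
      rw [ih s0 hnd.2 (fun j hj => h j (List.mem_cons_of_mem x hj))]
      by_cases hf : f0 ∈ l ∧ Ri.getD f0 0 ≠ 0 ∧ v.getD f0 0 ≠ 0
      · rw [if_pos hf, if_pos ⟨List.mem_cons_of_mem x hf.1, hf.2⟩]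
      · rw [if_neg hf, if_neg (by
          rintro ⟨hm, hc⟩
          rcases List.mem_cons.mp hm with he | hm'
          · exact hxf he.symm
          · exact hf ⟨hm', hc⟩)]

theorem v0_getD (n_cols f j : Nat) (hf : f < n_cols) :
    ((List.replicate n_cols (0 : Int)).set f 1).getD j 0 = if j = f then 1 else 0 := by
  rw [getD_set']
  have hrep : (List.replicate n_cols (0 : Int)).getD j 0 = 0 := by
    by_cases h : j < n_cols
    · exact List.getD_replicate _ h
    · exact List.getD_eq_default _ _ (by simpa using Nat.le_of_not_lt h)
  rw [List.length_replicate, hrep]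
  split_ifs with h1 h2 h2 <;> tauto

-- the whole inner accumulation loop of A computes R[t][f]
theorem sAcc_eq (n_rows n_cols : Nat) (R : List (List Int)) (piv : List Nat)
    (hG : Good n_rows n_cols R piv) (f : Nat) (hf : f < n_cols) (hfp : f ∉ piv)
    (t : Nat) (ht : t < piv.length) (w : List Int)
    (hw : ∀ j, w.getD j 0 = Wp R piv f (t + 1) j) :
    sAcc (R.getD t []) w (piv.getD t 0) n_cols = mget R t f := by
  have hcmem : piv.getD t 0 ∈ piv := by
    rw [List.getD_eq_getElem piv 0 ht]; exact List.getElem_mem ht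
  have hclt : piv.getD t 0 < n_cols := hG.hlt _ hcmem
  have hRi : ∀ j, (R.getD t []).getD j 0 = mget R t j := fun _ => rfl
  rw [sAcc, sAcc_single _ _ f _ 0 (List.nodup_range' 1) ?side]
  case side =>
    intro j hj hjf
    rw [List.mem_range'_1] at hj
    rintro ⟨ha, hb⟩
    by_cases hjp : j ∈ piv
    · obtain ⟨i, hi, hieq⟩ := List.mem_iff_getElem.mp hjp
      have hgi : piv.getD i 0 = j := by rw [List.getD_eq_getElem piv 0 hi, hieq]
      have hit : i ≠ t := by
        intro he
        rw [he] at hgi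
        omega
      have := hG.hdel t i ht hi
      rw [hgi, if_neg (fun he => hit he.symm)] at this
      exact ha (by rw [hRi, this])
    · rw [hw j, Wp_notmem R piv f (t + 1) j hjp, if_neg hjf] at hb
      exact hb rfl
  have hwf : w.getD f 0 = 1 := by
    rw [hw f, Wp_notmem R piv f (t + 1) f hfp, if_pos rfl]
  by_cases hcf : piv.getD t 0 < f
  · have hfmem : f ∈ List.range' (piv.getD t 0 + 1) (n_cols - (piv.getD t 0 + 1)) := by
      rw [List.mem_range'_1]
      omega
    by_cases haf : (R.getD t []).getD f 0 ≠ 0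
    · rw [if_pos ⟨hfmem, haf, by rw [hwf]; norm_num⟩, hwf, zero_add, mul_one, hRi]
      have := hG.hbnd t f ht hf
      omega
    · rw [not_not] at haf
      rw [if_neg (by tauto), ← hRi, haf]
  · have hfc : f < piv.getD t 0 := by
      have : f ≠ piv.getD t 0 := fun he => hfp (he ▸ hcmem)
      omega
    rw [if_neg (by
      rintro ⟨hm, _⟩
      rw [List.mem_range'_1] at hm
      omega)]
    rw [hG.hzero t f ht hfc hfp]

-- A's reversed back-substitution loop, processed down to index t
theorem backSub_char (n_rows n_cols : Nat) (R : List (List Int)) (piv : List Nat)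
    (hG : Good n_rows n_cols R piv) (f : Nat) (hf : f < n_cols) (hfp : f ∉ piv) :
    ∀ (m t : Nat), t + m = piv.length →
      (((List.range' t m).reverse.foldl
        (fun w i => w.set (piv.getD i 0) ((-(sAcc (R.getD i []) w (piv.getD i 0) n_cols)) % 257))
        ((List.replicate n_cols 0).set f 1)).length = n_cols ∧
       ∀ j, ((List.range' t m).reverse.foldl
        (fun w i => w.set (piv.getD i 0) ((-(sAcc (R.getD i []) w (piv.getD i 0) n_cols)) % 257))
        ((List.replicate n_cols 0).set f 1)).getD j 0 = Wp R piv f t j) := by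
  intro m
  induction m with
  | zero =>
    intro t ht
    constructor
    · simp
    · intro j
      rw [Wp_past R piv f t j (by omega)]
      simpa using v0_getD n_cols f j hf
  | succ m ih =>
    intro t ht
    have hrev : (List.range' t (m + 1)).reverse =
        (List.range' (t + 1) m).reverse ++ [t] := by
      rw [List.range'_succ, List.reverse_cons]
    rw [hrev, List.foldl_append, List.foldl_cons, List.foldl_nil]
    obtain ⟨ihlen, ihget⟩ := ih (t + 1) (by omega)
    have hts : t < piv.length := by omega
    have hsacc := sAcc_eq n_rows n_cols R piv hG f hf hfp t hts _ ihget
    have hclt : piv.getD t 0 < n_cols := by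
      refine hG.hlt _ ?_
      rw [List.getD_eq_getElem piv 0 hts]; exact List.getElem_mem hts
    constructor
    · rw [List.length_set, ihlen]
    · intro j
      rw [getD_set', hsacc, Wp_step R piv f t j hts]
      by_cases hj : piv.getD t 0 = j
      · rw [if_pos ⟨hj.symm, by rw [ihlen]; exact hclt⟩, if_pos hj]
      · rw [if_neg (by tauto), if_neg hj, ihget]

-- A's final renormalization pass is the identity on the vector it receives
theorem normalize_id (n_cols f : Nat) (w : List Int) (hlen : w.length = n_cols) (hf : f < n_cols)
    (hwf : w.getD f 0 = 1) (hhi : ∀ j, f < j → j < n_cols → w.getD j 0 = 0)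
    (hbnd : ∀ j, j < n_cols → 0 ≤ w.getD j 0 ∧ w.getD j 0 < 257) :
    pyNormalize w n_cols = w := by
  have hsplit : List.range' 0 n_cols =
      List.range' 0 (f + 1) ++ List.range' (f + 1) (n_cols - (f + 1)) := by
    have h := List.range'_append (s := 0) (m := f + 1) (n := n_cols - (f + 1)) (step := 1)
    simp only [Nat.zero_add, Nat.one_mul] at h
    rw [show (f + 1) + (n_cols - (f + 1)) = n_cols by omega] at h
    exact h.symm
  have hfind : (List.range n_cols).reverse.find? (fun i => w.getD i 0 % 257 != 0) = some f := by
    rw [List.range_eq_range', hsplit, List.reverse_append, List.find?_append]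
    have h1 : (List.range' (f + 1) (n_cols - (f + 1))).reverse.find?
        (fun i => w.getD i 0 % 257 != 0) = none := by
      rw [List.find?_eq_none]
      intro x hx
      rw [List.mem_reverse, List.mem_range'_1] at hx
      rw [hhi x (by omega) (by omega)]
      simp
    rw [h1, Option.none_or]
    have h2 : (List.range' 0 (f + 1)).reverse = f :: (List.range' 0 f).reverse := by
      rw [List.range'_1_concat, List.reverse_append]
      simp
    rw [h2, List.find?_cons]
    have : (w.getD f 0 % 257 != 0) = true := by rw [hwf]; norm_num
    rw [this]
  rw [pyNormalize, hfind]
  show w.map (fun x => (x * modinv257 (w.getD f 0 % 257)) % 257) = w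
  have hinv : modinv257 (w.getD f 0 % 257) = 1 := by
    rw [hwf]
    norm_num [modinv257]
  rw [hinv]
  apply List.ext_getElem (by simp)
  intro i h1 h2
  simp only [List.getElem_map, mul_one]
  have hb := hbnd i (by omega)
  rw [List.getD_eq_getElem w 0 h2] at hb
  exact Int.emod_eq_of_lt hb.1 hb.2

theorem eq_of_getD (l1 l2 : List Int) (h1 : l1.length = l2.length)
    (h : ∀ j, l1.getD j 0 = l2.getD j 0) : l1 = l2 := by
  apply List.ext_getElem h1
  intro i hi1 hi2
  have hj := h i
  rwa [List.getD_eq_getElem l1 0 hi1, List.getD_eq_getElem l2 0 hi2] at hj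

-- ===== simulation of A's indexed rref by B's (done, rest) reduction =====

theorem zip_trunc {α β : Type} :
    ∀ (xs : List α) (ys zs : List β), xs.length ≤ ys.length → xs.zip (ys ++ zs) = xs.zip ys := by
  intro xs
  induction xs with
  | nil => intro ys zs _; simp
  | cons x xs ih =>
    intro ys zs h
    cases ys with
    | nil => simp at h
    | cons y ys =>
      simp only [List.cons_append, List.zip_cons_cons]
      rw [ih ys zs (by simpa using h)]

theorem zip_fst_snd {α β : Type} : ∀ (l : List (α × β)), (l.map Prod.fst).zip (l.map Prod.snd) = l := by
  intro l
  induction l with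
  | nil => rfl
  | cons a l ih => simp [ih]

-- the pivot search over indices r .. n_rows-1 is the first-index search in the rest pool
theorem findPiv_shift (c : Nat) :
    ∀ (rest D : List (List Int)),
      findPiv (D ++ rest) D.length (D.length + rest.length) c =
        (rest.findIdx? (fun row => row.getD c 0 % 257 != 0)).map (fun k => D.length + k) := by
  intro rest
  induction rest with
  | nil =>
    intro D
    simp [findPiv, List.findIdx?_nil]
  | cons row rest ih =>
    intro D
    rw [findPiv, show D.length + (row :: rest).length - D.length = (row :: rest).length by omega]
    rw [List.length_cons, List.range'_succ, List.find?_cons]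
    have hm : mget (D ++ row :: rest) D.length c = row.getD c 0 := by
      unfold mget
      rw [getD_append_ge _ _ _ _ le_rfl]
      simp
    rw [List.findIdx?_cons, hm]
    cases hbp : (row.getD c 0 % 257 != 0) with
    | true => simp
    | false =>
      simp only [Bool.false_eq_true, if_false]
      have h2 := ih (D ++ [row])
      rw [findPiv] at h2
      simp only [List.length_append, List.length_singleton, List.append_assoc,
        List.singleton_append] at h2
      rw [show D.length + 1 + rest.length - (D.length + 1) = rest.length by omega] at h2
      rw [h2]
      cases hidx : rest.findIdx? (fun row => row.getD c 0 % 257 != 0) with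
      | none => simp
      | some k => simp; omega

theorem scaleRow_eq_map (row : List Int) (inv : Int) (n_cols : Nat) (h : row.length ≤ n_cols) :
    scaleRow row inv n_cols = row.map (fun x => (x * inv) % 257) := by
  unfold scaleRow
  apply List.ext_getElem (by simp)
  intro i h1 h2
  simp only [List.getElem_mapIdx, List.getElem_map]
  rw [if_pos (by simp at h1; omega)]

theorem reduceRow_length (row prow : List Int) (c : Nat) (h : row.length = prow.length) :
    (reduceRow row prow c).length = row.length := by
  unfold reduceRow
  split_ifs
  · rfl
  · simp [h]

theorem reduceRow_getD (row prow : List Int) (c j : Nat) (h : row.length = prow.length)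
    (hj : j < row.length) :
    (reduceRow row prow c).getD j 0 =
      if row.getD c 0 % 257 = 0 then row.getD j 0
      else (row.getD j 0 - (row.getD c 0 % 257) * prow.getD j 0) % 257 := by
  unfold reduceRow
  split_ifs with hf
  · rfl
  · rw [List.getD_eq_getElem _ _ (by simp; omega)]
    simp only [List.getElem_map, List.getElem_zip]
    rw [List.getD_eq_getElem row 0 hj, List.getD_eq_getElem prow 0 (by omega)]

theorem mget_append_cons (D T : List (List Int)) (q : List Int) (i j : Nat) :
    mget (D ++ q :: T) i j =
      if i < D.length then mget D i j
      else if i = D.length then q.getD j 0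
      else mget T (i - D.length - 1) j := by
  unfold mget
  split_ifs with h1 h2
  · rw [getD_append_lt _ _ _ _ h1]
  · rw [getD_append_ge _ _ _ _ (by omega)]
    rw [h2]
    simp
  · rw [getD_append_ge _ _ _ _ (by omega)]
    rw [show i - D.length = (i - D.length - 1) + 1 by omega]
    simp

-- the whole elimination loop on D ++ prow :: T is a map of _reduce over D and T
theorem elimAll_as_map (D T : List (List Int)) (prow : List Int) (c n_cols n_rows : Nat)
    (hD : ∀ row ∈ D, row.length = n_cols) (hT : ∀ row ∈ T, row.length = n_cols)
    (hp : prow.length = n_cols) (hnr : n_rows = D.length + 1 + T.length) :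
    elimAll (D ++ prow :: T) D.length c n_rows n_cols =
      D.map (fun row => reduceRow row prow c) ++ prow :: T.map (fun row => reduceRow row prow c) := by
  have hA2len : (D ++ prow :: T).length = n_rows := by simp; omega
  have hA2rows : ∀ row ∈ D ++ prow :: T, row.length = n_cols := by
    intro row hrow
    rcases List.mem_append.mp hrow with h | h
    · exact hD _ h
    · rcases List.mem_cons.mp h with h | h
      · rw [h]; exact hp
      · exact hT _ h
  obtain ⟨hE1, hE2, hE3⟩ := elimAll_spec (D ++ prow :: T) D.length c n_rows n_cols hA2len hA2rows
  have hmgr : ∀ j, mget (D ++ prow :: T) D.length j = prow.getD j 0 := by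
    intro j
    rw [mget_append_cons, if_neg (by omega), if_pos rfl]
  apply List.ext_getElem (by rw [hE1]; simp; omega)
  intro i hi1 hi2
  have hi : i < n_rows := by omega
  -- each side's row i has length n_cols
  have hrl : (elimAll (D ++ prow :: T) D.length c n_rows n_cols)[i].length = n_cols :=
    hE2 _ (List.getElem_mem hi1)
  have hmgetE : ∀ j, (elimAll (D ++ prow :: T) D.length c n_rows n_cols)[i].getD j 0 =
      mget (elimAll (D ++ prow :: T) D.length c n_rows n_cols) i j := by
    intro j
    unfold mget
    rw [List.getD_eq_getElem _ [] hi1]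
  -- the RHS row and its entries
  by_cases hlt : i < D.length
  · have hrhs : (D.map (fun row => reduceRow row prow c) ++
        prow :: T.map (fun row => reduceRow row prow c))[i] = reduceRow D[i] prow c := by
      rw [List.getElem_append_left (by simp; omega)]
      simp
    rw [hrhs]
    have hDi : D[i].length = n_cols := hD _ (List.getElem_mem hlt)
    apply List.ext_getElem (by rw [hrl, reduceRow_length _ _ _ (by omega)]; omega)
    intro j hj1 hj2
    have hjc : j < n_cols := by rwa [hrl] at hj1
    have hgD : ∀ j', mget (D ++ prow :: T) i j' = D[i].getD j' 0 := by
      intro j'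
      rw [mget_append_cons, if_pos hlt]
      unfold mget
      rw [List.getD_eq_getElem _ [] hlt]
    rw [← List.getD_eq_getElem _ 0 hj1, ← List.getD_eq_getElem _ 0 hj2]
    rw [hmgetE, hE3, reduceRow_getD _ _ _ _ (by omega) (by omega)]
    rw [hgD, hgD j, hmgr]
    by_cases hf : D[i].getD c 0 % 257 = 0
    · rw [if_pos hf, if_neg (by rintro ⟨-, -, hne, -⟩; exact hne hf)]
    · rw [if_neg hf, if_pos ⟨hi, by omega, hf, hjc⟩]
  · by_cases heq : i = D.length
    · have hrhs : (D.map (fun row => reduceRow row prow c) ++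
          prow :: T.map (fun row => reduceRow row prow c))[i] = prow := by
        rw [List.getElem_append_right (by simp; omega)]
        simp [heq]
      rw [hrhs]
      apply List.ext_getElem (by rw [hrl]; omega)
      intro j hj1 hj2
      rw [← List.getD_eq_getElem _ 0 hj1, ← List.getD_eq_getElem _ 0 hj2]
      rw [hmgetE, hE3, if_neg (by rintro ⟨-, hne, -⟩; exact hne heq), heq, hmgr]
    · have hgt : D.length < i := by omega
      have htl : i - D.length - 1 < T.length := by omega
      have hrhs : (D.map (fun row => reduceRow row prow c) ++
          prow :: T.map (fun row => reduceRow row prow c))[i] =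
          reduceRow T[i - D.length - 1] prow c := by
        rw [← List.getD_eq_getElem _ [] hi2]
        rw [getD_append_ge _ _ _ _ (by simp; omega)]
        simp only [List.length_map]
        conv_lhs => rw [show i - D.length = (i - D.length - 1) + 1 by omega]
        rw [List.getD_cons_succ, List.getD_eq_getElem _ [] (by simp; omega), List.getElem_map]
      rw [hrhs]
      have hTi : T[i - D.length - 1].length = n_cols := hT _ (List.getElem_mem htl)
      apply List.ext_getElem (by rw [hrl, reduceRow_length _ _ _ (by omega)]; omega)
      intro j hj1 hj2
      have hjc : j < n_cols := by rwa [hrl] at hj1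
      have hgT : ∀ j', mget (D ++ prow :: T) i j' = T[i - D.length - 1].getD j' 0 := by
        intro j'
        rw [mget_append_cons, if_neg (by omega), if_neg heq]
        unfold mget
        rw [List.getD_eq_getElem _ [] htl]
      rw [← List.getD_eq_getElem _ 0 hj1, ← List.getD_eq_getElem _ 0 hj2]
      rw [hmgetE, hE3, reduceRow_getD _ _ _ _ (by omega) (by omega)]
      rw [hgT, hgT j, hmgr]
      by_cases hf : T[i - D.length - 1].getD c 0 % 257 = 0
      · rw [if_pos hf, if_neg (by rintro ⟨-, -, hne, -⟩; exact hne hf)]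
      · rw [if_neg hf, if_pos ⟨hi, by omega, hf, hjc⟩]

-- the swap + scale of one pivot step, in (pool of rows) form
theorem stepA2_decomp (D rest : List (List Int)) (c n_cols : Nat) (k : Nat)
    (hk : k < rest.length) (hlen : ∀ row ∈ rest, row.length = n_cols) :
    stepA2 (D ++ rest) D.length (D.length + k) c n_cols =
      D ++ ((rest.getD k []).map (fun x => (x * modinv257 ((rest.getD k []).getD c 0 % 257)) % 257)) ::
        ((if k ≠ 0 then rest.set k (rest.getD 0 []) else rest).drop 1) := by
  have hkrow : (rest.getD k []).length = n_cols := by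
    refine hlen _ ?_
    rw [List.getD_eq_getElem _ [] hk]
    exact List.getElem_mem hk
  have hne0 : rest ≠ [] := by intro h; rw [h] at hk; simp at hk
  obtain ⟨x, t, rfl⟩ := List.exists_cons_of_ne_nil hne0
  cases k with
  | zero =>
    simp only [stepA2, Nat.add_zero, ne_eq, not_true_eq_false, ite_false,
      List.getD_cons_zero, List.drop_succ_cons, List.drop_zero]
    have hget : (D ++ x :: t).getD D.length [] = x := by
      rw [getD_append_ge _ _ _ _ le_rfl]; simp
    have hm : mget (D ++ x :: t) D.length c = x.getD c 0 := by
      unfold mget; rw [hget]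
    rw [hget, hm, scaleRow_eq_map _ _ _ (by
      have := hlen x List.mem_cons_self
      omega)]
    rw [show D.length = D.length + 0 by omega, List.set_append_right _ _ (by omega)]
    simp
  | succ k' =>
    have hne : D.length + (k' + 1) ≠ D.length := by omega
    simp only [stepA2, if_pos hne]
    have hgp : (D ++ x :: t).getD (D.length + (k' + 1)) [] = t.getD k' [] := by
      rw [getD_append_ge _ _ _ _ (by omega)]
      simp
    have hgr : (D ++ x :: t).getD D.length [] = x := by
      rw [getD_append_ge _ _ _ _ le_rfl]; simp
    rw [hgp, hgr]
    have hset1 : (D ++ x :: t).set D.length (t.getD k' []) = D ++ (t.getD k' []) :: t := by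
      rw [show D.length = D.length + 0 by omega, List.set_append_right _ _ (by omega)]
      simp
    rw [hset1]
    have hset2 : (D ++ (t.getD k' []) :: t).set (D.length + (k' + 1)) x =
        D ++ (t.getD k' []) :: t.set k' x := by
      rw [List.set_append_right _ _ (by omega)]
      simp
    rw [hset2]
    have hgr2 : (D ++ (t.getD k' []) :: t.set k' x).getD D.length [] = t.getD k' [] := by
      rw [getD_append_ge _ _ _ _ le_rfl]; simp
    have hm2 : mget (D ++ (t.getD k' []) :: t.set k' x) D.length c = (t.getD k' []).getD c 0 := by
      unfold mget; rw [hgr2]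
    rw [hgr2, hm2]
    rw [show D.length = D.length + 0 by omega, List.set_append_right _ _ (by omega)]
    simp only [Nat.add_sub_cancel_left, List.set_cons_zero]
    rw [scaleRow_eq_map _ _ _ (by
      have : (t.getD k' []).length = n_cols := by
        simpa using hkrow
      omega)]
    have hrest : ((x :: t).set (k' + 1) ((x :: t).getD 0 [])).drop 1 = t.set k' x := by
      simp
    rw [if_pos (by omega), hrest]
    have hgk : (x :: t).getD (k' + 1) [] = t.getD k' [] := by simp
    rw [hgk]

-- B's loop tracks A's loop: done is always the pivot-column/pivot-row zip of A's state
theorem bGo_sim (n_rows n_cols : Nat) :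
    ∀ (cs : List Nat) (done : List (Nat × List Int)) (rest : List (List Int)),
      done.length + rest.length = n_rows →
      (∀ row ∈ done.map Prod.snd, row.length = n_cols) →
      (∀ row ∈ rest, row.length = n_cols) →
      bGo cs done rest =
        (rrefGo n_rows n_cols cs (done.map Prod.snd ++ rest) (done.map Prod.fst)).2.zip
          (rrefGo n_rows n_cols cs (done.map Prod.snd ++ rest) (done.map Prod.fst)).1 := by
  intro cs
  induction cs with
  | nil =>
    intro done rest hn hD hT
    simp only [bGo, rrefGo]
    rw [zip_trunc _ _ _ (by simp)]
    exact (zip_fst_snd done).symm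
  | cons c cs' ih =>
    intro done rest hn hD hT
    have hfp : findPiv (done.map Prod.snd ++ rest) (done.map Prod.fst).length n_rows c =
        (rest.findIdx? (fun row => row.getD c 0 % 257 != 0)).map (fun k => done.length + k) := by
      have := findPiv_shift c rest (done.map Prod.snd)
      simp only [List.length_map] at this ⊢
      rw [show n_rows = done.length + rest.length from hn.symm]
      exact this
    cases hidx : rest.findIdx? (fun row => row.getD c 0 % 257 != 0) with
    | none =>
      rw [show bGo (c :: cs') done rest = bGo cs' done rest by simp only [bGo, hidx]]
      rw [rrefGo_cons_none _ _ _ _ _ _ (by rw [hfp, hidx]; rfl)]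
      exact ih done rest hn hD hT
    | some k =>
      have hk : k < rest.length := (List.findIdx?_eq_some_iff_findIdx_eq.mp hidx).1
      have hrestne : rest.length ≠ 0 := by omega
      -- names shared by the two sides
      set prow := (rest.getD k []).map
        (fun x => (x * modinv257 ((rest.getD k []).getD c 0 % 257)) % 257) with hprow
      set rest1 := (if k ≠ 0 then rest.set k (rest.getD 0 []) else rest).drop 1 with hrest1
      set done' := done.map (fun pr => (pr.1, reduceRow pr.2 prow c)) ++ [(c, prow)] with hdone'
      set rest2 := rest1.map (fun r => reduceRow r prow c) with hrest2
      have hbGo : bGo (c :: cs') done rest =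
          if rest2.isEmpty then done' else bGo cs' done' rest2 := by
        simp only [bGo, hidx]
        rfl
      have hrest1len : rest1.length = rest.length - 1 := by
        rw [hrest1]
        split_ifs <;> simp
      have hrest2len : rest2.length = rest.length - 1 := by
        rw [hrest2, List.length_map, hrest1len]
      -- A's step
      have hsome : findPiv (done.map Prod.snd ++ rest) (done.map Prod.fst).length n_rows c =
          some (done.length + k) := by
        rw [hfp, hidx]; rfl
      rw [hbGo, rrefGo_cons_some _ _ _ _ _ _ _ hsome]
      have hDlen : (done.map Prod.snd).length = done.length := by simp
      have hstep : stepA2 (done.map Prod.snd ++ rest) (done.map Prod.fst).length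
          (done.length + k) c n_cols = (done.map Prod.snd) ++ prow :: rest1 := by
        have h3 := stepA2_decomp (done.map Prod.snd) rest c n_cols k hk hT
        simp only [List.length_map] at h3 ⊢
        exact h3
      have hprowlen : prow.length = n_cols := by
        rw [hprow, List.length_map]
        refine hT _ ?_
        rw [List.getD_eq_getElem _ [] hk]
        exact List.getElem_mem hk
      have hrest1rows : ∀ row ∈ rest1, row.length = n_cols := by
        intro row hrow
        rw [hrest1] at hrow
        have hrow' := List.mem_of_mem_drop hrow
        split_ifs at hrow' with hk0
        · rcases List.mem_or_eq_of_mem_set hrow' with h | h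
          · exact hT _ h
          · refine h ▸ hT _ ?_
            rw [List.getD_eq_getElem _ [] (by omega)]
            exact List.getElem_mem _
        · exact hT _ hrow'
      have helim : elimAll ((done.map Prod.snd) ++ prow :: rest1) (done.map Prod.fst).length
          c n_rows n_cols =
          (done.map Prod.snd).map (fun row => reduceRow row prow c) ++ prow :: rest2 := by
        have h4 := elimAll_as_map (done.map Prod.snd) rest1 prow c n_cols n_rows hD hrest1rows
          hprowlen (by simp [hrest1len]; omega)
        simp only [List.length_map] at h4 ⊢
        exact h4
      have hdone'snd : done'.map Prod.snd =
          (done.map Prod.snd).map (fun row => reduceRow row prow c) ++ [prow] := by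
        rw [hdone']
        simp [List.map_map, Function.comp_def]
      have hdone'fst : done'.map Prod.fst = done.map Prod.fst ++ [c] := by
        rw [hdone']
        simp [List.map_map, Function.comp_def]
      have hA3 : (done.map Prod.snd).map (fun row => reduceRow row prow c) ++ prow :: rest2 =
          done'.map Prod.snd ++ rest2 := by
        rw [hdone'snd]
        simp
      have hdone'rows : ∀ row ∈ done'.map Prod.snd, row.length = n_cols := by
        rw [hdone'snd]
        intro row hrow
        rcases List.mem_append.mp hrow with h | h
        · obtain ⟨r0, hr0, rfl⟩ := List.mem_map.mp h
          rw [reduceRow_length _ _ _ (by rw [hD _ hr0, hprowlen])]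
          exact hD _ hr0
        · simp only [List.mem_singleton] at h
          rw [h]; exact hprowlen
      have hrest2rows : ∀ row ∈ rest2, row.length = n_cols := by
        rw [hrest2]
        intro row hrow
        obtain ⟨r0, hr0, rfl⟩ := List.mem_map.mp hrow
        rw [reduceRow_length _ _ _ (by rw [hrest1rows _ hr0, hprowlen])]
        exact hrest1rows _ hr0
      by_cases hbr : (done.map Prod.fst).length + 1 = n_rows
      · have hre : rest2.isEmpty = true := by
          rw [List.isEmpty_iff, ← List.length_eq_zero_iff, hrest2len]
          simp at hbr
          omega
        rw [if_pos hbr, if_pos hre, hstep, helim, hA3]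
        have hempty : rest2 = [] := by rwa [List.isEmpty_iff] at hre
        rw [hempty, List.append_nil, ← hdone'fst]
        simp only
        rw [zip_fst_snd done']
      · have hlen2 : rest2.length ≠ 0 := by
          rw [hrest2len]
          simp only [List.length_map] at hbr
          omega
        have hre : rest2.isEmpty = false := by
          rw [Bool.eq_false_iff]
          intro h
          rw [List.isEmpty_iff_length_eq_zero] at h
          exact hlen2 h
        rw [if_neg hbr, if_neg (by rw [hre]; simp), hstep, helim, hA3, ← hdone'fst]
        exact ih done' rest2 (by simp [hrest2len, hdone']; omega) hdone'rows hrest2rows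

-- B's per-entry lookup equals the closed-form entry Wp, when done = piv.zip R
theorem find_zip (j : Nat) :
    ∀ (piv : List Nat) (R : List (List Int)), piv.length ≤ R.length →
    (piv.zip R).find? (fun pr => pr.1 == j) =
      match piv.findIdx? (· == j) with
      | some i => some (j, R.getD i [])
      | none => none := by
  intro piv
  induction piv with
  | nil => intro R _; simp
  | cons a piv ih =>
    intro R hlen
    cases R with
    | nil => simp at hlen
    | cons b R =>
      rw [List.zip_cons_cons, List.find?_cons, List.findIdx?_cons]
      by_cases ha : a = j
      · have : (a == j) = true := by simpa using ha
        rw [this]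
        simp [ha]
      · have : (a == j) = false := by simpa using ha
        rw [this]
        simp only [Bool.false_eq_true, if_false]
        rw [ih R (by simpa using hlen)]
        cases hidx : piv.findIdx? (· == j) with
        | none => simp
        | some i => simp

theorem find_zipIdx (j : Nat) :
    ∀ (piv : List Nat) (k : Nat),
    (piv.zipIdx k).find? (fun ci => ci.1 == j) =
      match piv.findIdx? (· == j) with
      | some i => some (j, k + i)
      | none => none := by
  intro piv
  induction piv with
  | nil => intro k; simp
  | cons a piv ih =>
    intro k
    rw [List.zipIdx_cons, List.find?_cons, List.findIdx?_cons]
    by_cases ha : a = j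
    · have : (a == j) = true := by simpa using ha
      rw [this]
      simp [ha]
    · have : (a == j) = false := by simpa using ha
      rw [this]
      simp only [Bool.false_eq_true, if_false]
      rw [ih (k + 1)]
      cases hidx : piv.findIdx? (· == j) with
      | none => simp
      | some i => simp; omega

theorem bEntry_eq_Wp (R : List (List Int)) (piv : List Nat) (f j : Nat)
    (hlen : piv.length ≤ R.length) (hfp : f ∉ piv) :
    bEntry (piv.zip R) f j = Wp R piv f 0 j := by
  rw [bEntry, Wp, List.drop_zero]
  rw [find_zip j piv R hlen, find_zipIdx j piv 0]
  by_cases hjf : j = f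
  · subst hjf
    rw [if_pos rfl]
    have hnone : piv.findIdx? (· == j) = none := by
      rw [List.findIdx?_eq_none_iff]
      intro x hx
      simp only [beq_eq_false_iff_ne, ne_eq]
      intro he
      exact hfp (he ▸ hx)
    rw [hnone]
    simp
  · rw [if_neg hjf]
    cases hidx : piv.findIdx? (· == j) with
    | none => simp [hjf]
    | some i =>
      simp only [Nat.zero_add]
      rfl

-- per free column: A's vector equals B's vector
theorem vec_eq (n_rows n_cols : Nat) (R : List (List Int)) (piv : List Nat)
    (hG : Good n_rows n_cols R piv) (f : Nat) (hf : f < n_cols) (hfp : f ∉ piv) :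
    pyNormalize (backSub R piv n_cols ((List.replicate n_cols 0).set f 1)) n_cols =
      (List.range n_cols).map (fun j => bEntry (piv.zip R) f j) := by
  have hbs := backSub_char n_rows n_cols R piv hG f hf hfp piv.length 0 (by omega)
  rw [backSub, List.range_eq_range'] at *
  obtain ⟨hlen, hget⟩ := hbs
  have hpR : piv.length ≤ R.length := by rw [hG.hlen]; exact hG.hr
  rw [normalize_id n_cols f _ hlen hf
    (by rw [hget f, Wp_notmem R piv f 0 f hfp, if_pos rfl])
    (fun j hj _ => by rw [hget j]; exact Wp_gt n_rows n_cols R piv hG f 0 j hfp hj)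
    (fun j _ => by rw [hget j]; exact Wp_bounds R piv f 0 j)]
  apply eq_of_getD _ _ (by rw [hlen]; simp)
  intro j
  by_cases hj : j < n_cols
  · rw [hget j, List.getD_eq_getElem _ 0 (by simp [List.range_eq_range']; omega)]
    simp only [List.getElem_map]
    rw [bEntry_eq_Wp R piv f _ hpR hfp]
    congr 1
    simp [List.range_eq_range']
  · rw [List.getD_eq_default _ _ (by omega), List.getD_eq_default _ _ (by simp; omega)]

-- the degenerate case: an empty first row means zero columns, both return []
theorem main_eq_nil (M : List (List Int)) (h0 : (M.headD []).length = 0) :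
    nullspace_basis M = nullspace_basis_alt M := by
  have hnc : (if M.length = 0 then 0 else (M.headD []).length) = 0 := by
    split_ifs with h
    · rfl
    · exact h0
  have hrref : rref M = (M, []) := by
    rw [rref, hnc]
    rfl
  rw [nullspace_basis, nullspace_basis_alt, hrref, hnc]
  have hnil : M.headD [] = [] := List.length_eq_zero_iff.mp h0
  have hnil' : M.head?.getD [] = [] := by rwa [List.headD_eq_head?_getD] at hnil
  by_cases h : M.length = 0
  · simp [h]
  · simp [h, hnil']

theorem main_eq (M : List (List Int)) (h0 : (M.headD []).length ≠ 0)
    (hPre : ∀ row ∈ M, row.length = (M.headD []).length) :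
    nullspace_basis M = nullspace_basis_alt M := by
  have hG := rref_good M hPre
  have hMne : M.length ≠ 0 := by
    intro h
    rw [List.length_eq_zero_iff] at h
    subst h
    simp at h0
  set nc := if M.length = 0 then 0 else (M.headD []).length with hncdef
  have hncM : nc = (M.headD []).length := by rw [hncdef, if_neg hMne]
  have hcols : (if (rref M).1.length = 0 then 0 else ((rref M).1.headD []).length) = nc := by
    have hRlen : (rref M).1.length = M.length := hG.hlen
    rw [hRlen, if_neg hMne]
    have hRne : (rref M).1 ≠ [] := by
      intro he
      rw [he] at hRlen
      simp at hRlen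
      omega
    obtain ⟨x, xs, hxe⟩ := List.exists_cons_of_ne_nil hRne
    rw [hxe, List.headD_cons]
    rw [hG.hrows x (by rw [hxe]; exact List.mem_cons_self)]
  -- the simulation: B's done is the zip of A's pivot columns with A's matrix rows
  have hsim : bGo (List.range nc) [] M = (rref M).2.zip (rref M).1 := by
    have := bGo_sim M.length nc (List.range nc) [] M (by simp) (by simp)
      (fun row hrow => by rw [hPre row hrow, hncM])
    simp only [List.map_nil, List.nil_append, List.length_nil] at this
    rw [this]
    rw [rref]
  have hpivR : (rref M).2.length ≤ (rref M).1.length := by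
    rw [hG.hlen]; exact hG.hr
  rw [nullspace_basis, nullspace_basis_alt]
  simp only [hcols, ← hncdef, hsim]
  rw [List.map_fst_zip hpivR]
  by_cases hemp : ((List.range nc).filter (fun c => !((rref M).2.contains c))).isEmpty
  · rw [if_pos hemp]
    rw [List.isEmpty_iff] at hemp
    rw [hemp, List.map_nil]
  · rw [if_neg hemp]
    apply List.map_congr_left
    intro f hfm
    rw [List.mem_filter] at hfm
    have hf : f < nc := List.mem_range.mp hfm.1
    have hfp : f ∉ (rref M).2 := by
      intro hmem
      have := hfm.2
      rw [List.contains_iff_mem.mpr hmem] at this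
      simp at this
    exact vec_eq M.length nc (rref M).1 (rref M).2 hG f hf hfp

-- ===== VERDICT (by name: the statement is the Claim_ definition above) =====
theorem nullspace_basis_spec : Claim_equal_nullspace_basis := by
  intro M _ hPre
  show nullspace_basis M = nullspace_basis_alt M
  by_cases h0 : (M.headD []).length = 0
  · exact main_eq_nil M h0
  · refine main_eq M h0 (fun row hrow => ?_)
    rcases hPre row hrow with h | h
    · exact absurd h h0
    · exact h
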